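-- pv_equiv track=rewrite | github.com/alexpdev/cryptogram | cryptogram2/phrase.py | get_int_map
-- ===== SOURCE A (Python) =====
-- def get_int_map(word):
--     mapping, translation, counter = {}, [], 1
--     for item in word:
--         if item in mapping:
--             translation.append(mapping[item])
--         else:
--             mapping[item] = counter
--             counter += 1
--     return mapping
-- ===== SOURCE B (Python) =====
-- def get_int_map(word):
--     order = sorted(set(word), key=word.index)
--     return {c: len(set(word[:word.index(c)])) + 1 for c in order}
-- ===== Notes on version B (the rewrite author's own statement) =====
-- stated objective: alternative
-- what changed: Replaces A's single left-to-right pass maintaining a counter and a membership branch by a staged strategy: take the distinct characters, sort them by first-occurrence index, and compute each id independently as 1 + the number of distinct characters in the prefix before that character's first occurrence.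
import Mathlib
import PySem

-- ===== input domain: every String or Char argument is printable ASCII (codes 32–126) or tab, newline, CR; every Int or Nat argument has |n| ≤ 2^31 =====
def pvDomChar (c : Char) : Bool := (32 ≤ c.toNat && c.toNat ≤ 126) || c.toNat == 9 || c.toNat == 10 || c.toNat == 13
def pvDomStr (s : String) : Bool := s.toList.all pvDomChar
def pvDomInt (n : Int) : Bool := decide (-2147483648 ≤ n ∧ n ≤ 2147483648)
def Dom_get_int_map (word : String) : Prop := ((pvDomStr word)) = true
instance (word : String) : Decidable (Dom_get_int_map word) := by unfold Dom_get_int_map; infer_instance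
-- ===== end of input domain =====

-- B replaces A's single counting pass by a staged sort-by-first-index strategy where each id is
-- computed independently as a distinct-count of a prefix; alternative decomposition, not faster.

-- ===== PORT A =====
-- one loop iteration of A: state = (mapping, translation, counter)
def getIntMapStep (s : PySem.Dict String Int × List Int × Int) (item : Char) :
    PySem.Dict String Int × List Int × Int :=
  if s.1.contains (String.ofList [item]) then
    (s.1, s.2.1 ++ [s.1.getD (String.ofList [item]) 0], s.2.2)
  else
    (s.1.insert (String.ofList [item]) s.2.2, s.2.1, s.2.2 + 1)

def get_int_map (word : String) : List (String × Int) :=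
  (word.toList.foldl getIntMapStep (PySem.Dict.empty, [], 1)).1.items

-- ===== PORT B =====
-- order = sorted(set(word), key=word.index); word.index(c) for c ∈ word is the first
-- occurrence index, ported as List.idxOf (always found here, so no ValueError arises).
-- {c: len(set(word[:word.index(c)])) + 1 for c in order}
def get_int_map_alt (word : String) : List (String × Int) :=
  let chars := word.toList
  let order := PySem.List.sorted (PySem.Set.ofList chars) (fun c => chars.idxOf c) false
  order.map (fun c =>
    (String.ofList [c], ((PySem.Set.ofList (chars.take (chars.idxOf c))).length : Int) + 1))

-- ===== PRECONDITION & SPEC =====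
def Spec_get_int_map (word : String) (out : List (String × Int)) : Prop := out = get_int_map_alt word
instance (word : String) (out : List (String × Int)) : Decidable (Spec_get_int_map word out) := by unfold Spec_get_int_map; infer_instance

-- ===== CLAIM (what is proved, stated in full; the proofs are below) =====
def Claim_equal_get_int_map : Prop := ∀ (word : String), Dom_get_int_map word → Spec_get_int_map word (get_int_map word)

-- ===== LEMMAS AND PROOFS =====

-- A's mapping written as a list of items, for an arbitrary dedup'd prefix u
def enumItems (u : List Char) : List (String × Int) :=
  (PySem.List.enumerate u 1).map (fun p => (String.ofList [p.2], p.1))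

lemma enumerate_append_singleton (u : List Char) (x : Char) (s : Int) :
    PySem.List.enumerate (u ++ [x]) s
      = PySem.List.enumerate u s ++ [(s + u.length, x)] := by
  induction u generalizing s with
  | nil => simp [PySem.List.enumerate_cons, PySem.List.enumerate_nil]
  | cons a u ih =>
      simp [PySem.List.enumerate_cons, ih]
      ring_nf

lemma enumItems_append (u : List Char) (x : Char) :
    enumItems (u ++ [x]) = enumItems u ++ [(String.ofList [x], (u.length : Int) + 1)] := by
  simp [enumItems, enumerate_append_singleton]
  ring_nf

lemma any_enumItems (u : List Char) (x : Char) : ∀ (s : Int),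
    (((PySem.List.enumerate u s).map (fun p => (String.ofList [p.2], p.1))).any
        (fun p => p.1 == String.ofList [x])) = u.contains x := by
  induction u with
  | nil => intro s; rfl
  | cons a u ih =>
      intro s
      have hkey : ((String.ofList [a] == String.ofList [x]) = (a == x)) := by
        by_cases h : a = x
        · simp [h]
        · have h1 : (String.ofList [a] == String.ofList [x]) = false := by
            apply beq_false_of_ne
            intro hc
            apply h
            have := congrArg String.toList hc
            simpa using this
          have h2 : (a == x) = false := beq_false_of_ne h
          rw [h1, h2]
      simp only [PySem.List.enumerate_cons, List.map_cons, List.any_cons]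
      rw [hkey, ih (s + 1), List.contains_cons, Bool.beq_comm]

lemma contains_enumItems (u : List Char) (x : Char) :
    (PySem.Dict.mk (enumItems u)).contains (String.ofList [x]) = u.contains x := by
  simp only [enumItems, PySem.Dict.contains]
  exact any_enumItems u x 1

lemma loopA_eq (l : List Char) : ∀ (u : List Char) (t : List Int),
    (l.foldl getIntMapStep (PySem.Dict.mk (enumItems u), t, (u.length : Int) + 1)).1
      = PySem.Dict.mk (enumItems (l.foldl PySem.Set.add u)) := by
  induction l with
  | nil => intro u t; simp
  | cons x l ih =>
      intro u t
      rw [List.foldl_cons, List.foldl_cons]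
      by_cases hmem : u.contains x
      · have hstep : getIntMapStep (PySem.Dict.mk (enumItems u), t, (u.length : Int) + 1) x
            = (PySem.Dict.mk (enumItems u),
               t ++ [(PySem.Dict.mk (enumItems u)).getD (String.ofList [x]) 0],
               (u.length : Int) + 1) := by
          unfold getIntMapStep
          dsimp only
          rw [contains_enumItems, hmem]
          simp
        have hadd : PySem.Set.add u x = u := by
          unfold PySem.Set.add PySem.Set.contains
          rw [hmem]
          simp
        rw [hstep, hadd]
        exact ih u _
      · have hmemf : u.contains x = false := by simpa using hmem
        have hc : (PySem.Dict.mk (enumItems u)).contains (String.ofList [x]) = false := by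
          rw [contains_enumItems, hmemf]
        have hins : (PySem.Dict.mk (enumItems u)).insert (String.ofList [x]) ((u.length : Int) + 1)
            = PySem.Dict.mk (enumItems (u ++ [x])) := by
          have h := PySem.Dict.items_insert_of_not_contains
            (PySem.Dict.mk (enumItems u)) ((u.length : Int) + 1) hc
          simp only [enumItems_append]
          exact congrArg PySem.Dict.mk h
        have hstep : getIntMapStep (PySem.Dict.mk (enumItems u), t, (u.length : Int) + 1) x
            = (PySem.Dict.mk (enumItems (u ++ [x])), t, ((u ++ [x]).length : Int) + 1) := by
          unfold getIntMapStep
          dsimp only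
          rw [contains_enumItems, hmemf]
          simp [hins]
        have hadd : PySem.Set.add u x = u ++ [x] := by
          unfold PySem.Set.add PySem.Set.contains
          rw [hmemf]
          simp
        rw [hstep, hadd]
        exact ih (u ++ [x]) t

lemma ofList_append_singleton (l : List Char) (x : Char) :
    PySem.Set.ofList (l ++ [x]) = PySem.Set.add (PySem.Set.ofList l) x := by
  rw [PySem.Set.ofList_eq_foldl, PySem.Set.ofList_eq_foldl, List.foldl_append]; rfl

lemma add_ofList_of_mem (l : List Char) (x : Char) (hx : x ∈ l) :
    PySem.Set.add (PySem.Set.ofList l) x = PySem.Set.ofList l := by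
  unfold PySem.Set.add
  simp [PySem.Set.contains, PySem.Set.mem_ofList, hx]

lemma add_ofList_of_not_mem (l : List Char) (x : Char) (hx : x ∉ l) :
    PySem.Set.add (PySem.Set.ofList l) x = PySem.Set.ofList l ++ [x] := by
  unfold PySem.Set.add
  simp [PySem.Set.contains, PySem.Set.mem_ofList, hx]

-- the first-occurrence indices strictly increase along set(l)
lemma pairwise_idxOf_ofList (l : List Char) :
    (PySem.Set.ofList l).Pairwise (fun a b => l.idxOf a < l.idxOf b) := by
  induction l using List.reverseRecOn with
  | nil => simp [PySem.Set.ofList]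
  | append_singleton l x ih =>
      rw [ofList_append_singleton]
      by_cases hx : x ∈ l
      · rw [add_ofList_of_mem l x hx]
        refine ih.imp_of_mem ?_
        intro a b ha hb hab
        have ha' : a ∈ l := (PySem.Set.mem_ofList l a).mp ha
        have hb' : b ∈ l := (PySem.Set.mem_ofList l b).mp hb
        rw [List.idxOf_append, List.idxOf_append, if_pos ha', if_pos hb']
        exact hab
      · rw [add_ofList_of_not_mem l x hx, List.pairwise_append]
        refine ⟨?_, by simp, ?_⟩
        · refine ih.imp_of_mem ?_
          intro a b ha hb hab
          have ha' : a ∈ l := (PySem.Set.mem_ofList l a).mp ha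
          have hb' : b ∈ l := (PySem.Set.mem_ofList l b).mp hb
          rw [List.idxOf_append, List.idxOf_append, if_pos ha', if_pos hb']
          exact hab
        · intro a ha b hb
          have ha' : a ∈ l := (PySem.Set.mem_ofList l a).mp ha
          have hb' : b = x := by simpa using hb
          subst hb'
          rw [List.idxOf_append, List.idxOf_append, if_pos ha', if_neg hx]
          have h1 : List.idxOf a l < l.length := List.idxOf_lt_length_iff.mpr ha'
          have h2 : List.idxOf b [b] = 0 := by simp
          omega

-- distinct-count of the prefix before c's first occurrence = c's position in set(l)
lemma prefix_count_eq_rank (l : List Char) :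
    ∀ c ∈ PySem.Set.ofList l,
      (PySem.Set.ofList (l.take (l.idxOf c))).length = (PySem.Set.ofList l).idxOf c := by
  induction l using List.reverseRecOn with
  | nil => intro c hc; simp [PySem.Set.ofList] at hc
  | append_singleton l x ih =>
      intro c hc
      rw [ofList_append_singleton] at hc ⊢
      by_cases hx : x ∈ l
      · rw [add_ofList_of_mem l x hx] at hc ⊢
        have hc' : c ∈ l := (PySem.Set.mem_ofList l c).mp hc
        rw [List.idxOf_append, if_pos hc',
            List.take_append_of_le_length (le_of_lt (List.idxOf_lt_length_iff.mpr hc'))]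
        exact ih c hc
      · rw [add_ofList_of_not_mem l x hx] at hc ⊢
        rcases List.mem_append.mp hc with hc | hc
        · have hc' : c ∈ l := (PySem.Set.mem_ofList l c).mp hc
          rw [List.idxOf_append, if_pos hc',
              List.take_append_of_le_length (le_of_lt (List.idxOf_lt_length_iff.mpr hc')),
              List.idxOf_append, if_pos hc]
          exact ih c hc
        · have hc' : c = x := by simpa using hc
          subst hc'
          have hnx : c ∉ PySem.Set.ofList l := fun h => hx ((PySem.Set.mem_ofList l c).mp h)
          rw [List.idxOf_append, if_neg hx, List.idxOf_append, if_neg hnx]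
          simp

-- B's ordered list of distinct characters is exactly set(word) in first-occurrence order
lemma sorted_ofList_eq (l : List Char) :
    PySem.List.sorted (PySem.Set.ofList l) (fun c => l.idxOf c) = PySem.Set.ofList l := by
  refine PySem.List.sorted_eq_self_of_pairwise _ _ ?_
  exact (pairwise_idxOf_ofList l).imp (fun h => le_of_lt h)

lemma enumItems_eq_map (l : List Char) :
    enumItems (PySem.Set.ofList l)
      = (PySem.Set.ofList l).map (fun c =>
          (String.ofList [c], ((PySem.Set.ofList (l.take (l.idxOf c))).length : Int) + 1)) := by
  apply List.ext_getElem
  · simp [enumItems, PySem.List.length_enumerate]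
  · intro k h1 h2
    have hk : k < (PySem.Set.ofList l).length := by
      simpa [enumItems, PySem.List.length_enumerate] using h1
    have hke : k < (PySem.List.enumerate (PySem.Set.ofList l) 1).length := by
      simpa [PySem.List.length_enumerate] using hk
    have hmem : (PySem.Set.ofList l)[k] ∈ PySem.Set.ofList l := List.getElem_mem hk
    have hrank := prefix_count_eq_rank l (PySem.Set.ofList l)[k] hmem
    have hidx : (PySem.Set.ofList l).idxOf (PySem.Set.ofList l)[k] = k :=
      (PySem.Set.nodup_ofList l).idxOf_getElem k hk
    simp only [enumItems, List.getElem_map, PySem.List.getElem_enumerate, hrank, hidx,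
      Prod.mk.injEq]
    exact ⟨trivial, by omega⟩

-- ===== VERDICT (by name: the statement is the Claim_ definition above) =====
theorem get_int_map_spec : Claim_equal_get_int_map := by
  intro word _
  unfold Spec_get_int_map get_int_map get_int_map_alt
  have h0 : (PySem.Dict.empty : PySem.Dict String Int) = PySem.Dict.mk (enumItems []) := by
    simp [PySem.Dict.empty, enumItems, PySem.List.enumerate_nil]
  have hA := loopA_eq word.toList [] []
  simp only [enumItems, List.length_nil, Nat.cast_zero, zero_add] at hA h0 ⊢
  rw [h0, hA]
  have hfold : word.toList.foldl PySem.Set.add [] = PySem.Set.ofList word.toList :=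
    (PySem.Set.ofList_eq_foldl word.toList).symm
  rw [hfold, sorted_ofList_eq]
  have := enumItems_eq_map word.toList
  simpa [enumItems] using this
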